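-- pv_equiv track=rewrite | github.com/arturs68/transform-and-tell | tell/data/dataset_readers/nytimes_names_copy.py | _flatten_name_indices
-- ===== SOURCE A (Python) =====
-- def _flatten_name_indices(paragraphs, indices):
--     new_indices = []
--     offset = 0
--     for par, idx_list in zip(paragraphs, indices):
--         for start, end in idx_list:
--             new_indices.append((start + offset, end + offset))
--         offset += len(par) + 1  # newline
--
--     return new_indices
-- ===== SOURCE B (Python) =====
-- def _flatten_name_indices(paragraphs, indices):
--     # Precomputed prefix-offset table: offsets[i] = sum of len(par_j)+1 for j < i.
--     offsets = [0]
--     for par in paragraphs: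
--         offsets.append(offsets[-1] + len(par) + 1)
--     return [(start + off, end + off)
--             for off, idx_list in zip(offsets[:-1], indices)
--             for start, end in idx_list]
-- ===== Notes on version B (the rewrite author's own statement) =====
-- stated objective: alternative
-- what changed: B first builds an explicit prefix-offset table over the paragraphs, then emits the shifted pairs with a single flat mapping over the zipped (offset, index-list) pairs, instead of A's interleaved single pass that mutates a running offset while appending.
import Mathlib
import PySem

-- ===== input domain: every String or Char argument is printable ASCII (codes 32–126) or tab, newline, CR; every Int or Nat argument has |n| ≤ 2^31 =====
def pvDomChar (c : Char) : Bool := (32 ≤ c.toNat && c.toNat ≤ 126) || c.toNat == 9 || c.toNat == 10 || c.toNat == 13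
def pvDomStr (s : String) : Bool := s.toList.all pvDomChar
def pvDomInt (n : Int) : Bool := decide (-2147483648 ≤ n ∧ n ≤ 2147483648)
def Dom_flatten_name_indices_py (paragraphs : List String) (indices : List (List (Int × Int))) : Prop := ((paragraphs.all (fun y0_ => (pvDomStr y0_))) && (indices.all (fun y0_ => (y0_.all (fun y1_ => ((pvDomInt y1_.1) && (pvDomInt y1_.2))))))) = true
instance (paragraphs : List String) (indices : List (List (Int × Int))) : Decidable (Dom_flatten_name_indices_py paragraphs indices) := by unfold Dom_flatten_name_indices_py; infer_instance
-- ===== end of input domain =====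

-- B replaces A's interleaved accumulate-and-emit pass by an explicit prefix-offset
-- table followed by a flat mapping pass (alternative decomposition, same cost).


-- ===== PORT A =====
def flatten_name_indices_py (paragraphs : List String) (indices : List (List (Int × Int))) : List (Int × Int) :=
  (List.foldl
    (fun (st : List (Int × Int) × Int) (pi : String × List (Int × Int)) =>
      let ni := pi.2.foldl (fun acc se => acc ++ [(se.1 + st.2, se.2 + st.2)]) st.1
      (ni, st.2 + PySem.Str.len pi.1 + 1))
    ([], 0) (paragraphs.zip indices)).1

-- ===== PORT B =====
def flatten_name_indices_py_alt (paragraphs : List String) (indices : List (List (Int × Int))) : List (Int × Int) :=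
  let offsets : List Int :=
    paragraphs.foldl (fun acc par => acc ++ [acc.getLast! + PySem.Str.len par + 1]) [0]
  ((offsets.dropLast).zip indices).flatMap
    (fun oi => oi.2.map (fun se => (se.1 + oi.1, se.2 + oi.1)))

-- ===== PRECONDITION & SPEC =====
def Spec_flatten_name_indices_py (paragraphs : List String) (indices : List (List (Int × Int))) (out : List (Int × Int)) : Prop := out = flatten_name_indices_py_alt paragraphs indices
instance (paragraphs : List String) (indices : List (List (Int × Int))) (out : List (Int × Int)) : Decidable (Spec_flatten_name_indices_py paragraphs indices out) := by unfold Spec_flatten_name_indices_py; infer_instance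

-- ===== CLAIM (what is proved, stated in full; the proofs are below) =====
def Claim_equal_flatten_name_indices_py : Prop := ∀ (paragraphs : List String) (indices : List (List (Int × Int))), Dom_flatten_name_indices_py paragraphs indices → Spec_flatten_name_indices_py paragraphs indices (flatten_name_indices_py paragraphs indices)

-- ===== LEMMAS AND PROOFS =====

/-- The common core: shifted pairs emitted paragraph by paragraph. -/
def pvCore (off : Int) : List String → List (List (Int × Int)) → List (Int × Int)
  | _, [] => []
  | [], _ => []
  | p :: ps, i :: is =>
      i.map (fun se => (se.1 + off, se.2 + off)) ++ pvCore (off + PySem.Str.len p + 1) ps is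

/-- The offset table aligned to the paragraphs. -/
def pvOffs (off : Int) : List String → List Int
  | [] => []
  | p :: ps => off :: pvOffs (off + PySem.Str.len p + 1) ps

theorem pvInnerFold (l : List (Int × Int)) (acc : List (Int × Int)) (off : Int) :
    l.foldl (fun acc se => acc ++ [(se.1 + off, se.2 + off)]) acc
      = acc ++ l.map (fun se => (se.1 + off, se.2 + off)) := by
  induction l generalizing acc with
  | nil => simp
  | cons h t ih => simp [List.foldl, ih]

theorem pvAfold (ps : List String) (is : List (List (Int × Int)))
    (acc : List (Int × Int)) (off : Int) :
    (List.foldl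
      (fun (st : List (Int × Int) × Int) (pi : String × List (Int × Int)) =>
        let ni := pi.2.foldl (fun acc se => acc ++ [(se.1 + st.2, se.2 + st.2)]) st.1
        (ni, st.2 + PySem.Str.len pi.1 + 1))
      (acc, off) (ps.zip is)).1 = acc ++ pvCore off ps is := by
  induction ps generalizing is acc off with
  | nil => cases is <;> simp [pvCore]
  | cons p ps ih =>
      cases is with
      | nil => simp [pvCore]
      | cons i is =>
          have ih' := ih is (acc ++ i.map (fun se => (se.1 + off, se.2 + off))) (off + PySem.Str.len p + 1)
          simp only [pvInnerFold] at ih'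
          simp only [List.zip_cons_cons, List.foldl, pvInnerFold]
          rw [ih', pvCore, List.append_assoc]

theorem pvGetLastBang_concat (l : List Int) (a : Int) : (l ++ [a]).getLast! = a := by
  induction l with
  | nil => rfl
  | cons h t ih =>
      cases t with
      | nil => simp [List.getLast!]
      | cons b t => simp [List.getLast!, List.getLast]

theorem pvBfoldOffsets (ps : List String) (pre : List Int) (off : Int) :
    (ps.foldl (fun acc par => acc ++ [acc.getLast! + PySem.Str.len par + 1]) (pre ++ [off])).dropLast
      = pre ++ pvOffs off ps := by
  induction ps generalizing pre off with
  | nil => simp [pvOffs]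
  | cons p ps ih =>
      have h1 : ((pre ++ [off]) ++ [(pre ++ [off]).getLast! + PySem.Str.len p + 1])
          = (pre ++ [off]) ++ [off + PySem.Str.len p + 1] := by
        rw [pvGetLastBang_concat]
      calc ((p :: ps).foldl (fun acc par => acc ++ [acc.getLast! + PySem.Str.len par + 1]) (pre ++ [off])).dropLast
          = (ps.foldl (fun acc par => acc ++ [acc.getLast! + PySem.Str.len par + 1]) ((pre ++ [off]) ++ [off + PySem.Str.len p + 1])).dropLast := by
            simp only [List.foldl]; rw [h1]
        _ = (pre ++ [off]) ++ pvOffs (off + PySem.Str.len p + 1) ps := ih _ _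
        _ = pre ++ pvOffs off (p :: ps) := by simp [pvOffs]

theorem pvBcore (ps : List String) (is : List (List (Int × Int))) (off : Int) :
    ((pvOffs off ps).zip is).flatMap (fun oi => oi.2.map (fun se => (se.1 + oi.1, se.2 + oi.1)))
      = pvCore off ps is := by
  induction ps generalizing is off with
  | nil => cases is <;> simp [pvOffs, pvCore]
  | cons p ps ih =>
      cases is with
      | nil => simp [pvOffs, pvCore]
      | cons i is => simp [pvOffs, pvCore, List.flatMap_cons, ih]

-- ===== VERDICT (by name: the statement is the Claim_ definition above) =====
theorem flatten_name_indices_py_spec : Claim_equal_flatten_name_indices_py := by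
  intro paragraphs indices _
  unfold Spec_flatten_name_indices_py flatten_name_indices_py flatten_name_indices_py_alt
  rw [pvAfold]
  have h := pvBfoldOffsets paragraphs [] 0
  simp only [List.nil_append] at h
  simp only [h, pvBcore, List.nil_append]
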